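-- pv_equiv track=rewrite | github.com/pepperpow/smb2-door-randomizer | game_lib/smb2.py | get_solidness
-- ===== SOURCE A (Python) =====
-- def get_solidness(tile: int):
--     """
--     Returns tile solidity (similar to original SMB2 game table)
--     Returns empty (0) if not valid
--     """
--     solidness = sorted([ 0x01, 0x43, 0x80, 0xC0, 0x12, 0x60, 0x91, 0xCA, 0x18, 0x69, 0x98, 0xD5, 0x40, 0x80, 0xc0, 0x100])
--     tile = tile % 256
--     for cnt, x in enumerate(solidness):
--         solidness = cnt % 4
--         if tile < x:
--             return solidness
--     return 0
-- ===== SOURCE B (Python) =====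
-- import bisect
--
-- # Sorted threshold table, built once at module load.
-- _SOLIDNESS_TABLE = sorted([0x01, 0x43, 0x80, 0xC0, 0x12, 0x60, 0x91, 0xCA,
--                            0x18, 0x69, 0x98, 0xD5, 0x40, 0x80, 0xC0, 0x100])
--
-- def get_solidness(tile: int):
--     """
--     Returns tile solidity (similar to original SMB2 game table)
--     Returns empty (0) if not valid
--     """
--     return bisect.bisect_right(_SOLIDNESS_TABLE, tile % 256) % 4
-- ===== Notes on version B (the rewrite author's own statement) =====
-- stated objective: idiomatic
-- what changed: B hoists the sorted threshold table to a module-level constant built once and replaces A's per-call sort plus linear enumerate-scan with a single bisect_right binary search, taking the found index mod 4.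
import Mathlib
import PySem

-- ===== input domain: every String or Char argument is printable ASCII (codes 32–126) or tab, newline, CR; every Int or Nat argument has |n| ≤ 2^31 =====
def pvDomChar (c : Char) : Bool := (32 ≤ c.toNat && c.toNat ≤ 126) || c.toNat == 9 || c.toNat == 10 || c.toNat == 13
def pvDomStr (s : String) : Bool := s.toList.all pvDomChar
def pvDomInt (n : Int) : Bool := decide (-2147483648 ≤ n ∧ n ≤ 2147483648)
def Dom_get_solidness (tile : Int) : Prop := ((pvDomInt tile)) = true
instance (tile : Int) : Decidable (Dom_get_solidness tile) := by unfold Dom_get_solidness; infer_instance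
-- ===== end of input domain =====

-- B replaces A's linear scan over the per-call-sorted threshold table by a module-level
-- sorted table and one bisect_right binary search (objective: idiomatic).
set_option maxRecDepth 4096


-- ===== PORT A =====
-- the 'for cnt, x in enumerate(solidness): ... if tile < x: return cnt % 4' loop
def goA (tile : Int) : List (Int × Int) → Int
  | [] => 0
  | (cnt, x) :: rest => if tile < x then PySem.Int.mod cnt 4 else goA tile rest

def get_solidness (tile : Int) : Int :=
  let solidness := PySem.List.sorted
    [(0x01 : Int), 0x43, 0x80, 0xC0, 0x12, 0x60, 0x91, 0xCA, 0x18, 0x69, 0x98, 0xD5, 0x40, 0x80, 0xC0, 0x100]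
    (fun x => x) false
  let t := PySem.Int.mod tile 256
  goA t (PySem.List.enumerate solidness 0)

-- ===== PORT B =====
-- _SOLIDNESS_TABLE, built once at module load
def solidnessTable : List Int := PySem.List.sorted
  [(0x01 : Int), 0x43, 0x80, 0xC0, 0x12, 0x60, 0x91, 0xCA, 0x18, 0x69, 0x98, 0xD5, 0x40, 0x80, 0xC0, 0x100]
  (fun x => x) false

def get_solidness_alt (tile : Int) : Int :=
  PySem.Int.mod ((PySem.List.bisectRight solidnessTable (PySem.Int.mod tile 256) : Nat) : Int) 4

-- ===== PRECONDITION & SPEC =====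
def Spec_get_solidness (tile : Int) (out : Int) : Prop := out = get_solidness_alt tile
instance (tile : Int) (out : Int) : Decidable (Spec_get_solidness tile out) := by unfold Spec_get_solidness; infer_instance

-- ===== CLAIM (what is proved, stated in full; the proofs are below) =====
def Claim_equal_get_solidness : Prop := ∀ (tile : Int), Dom_get_solidness tile → Spec_get_solidness tile (get_solidness tile)

-- ===== LEMMAS AND PROOFS =====
theorem pv_mod256_bounds (tile : Int) :
    0 ≤ PySem.Int.mod tile 256 ∧ PySem.Int.mod tile 256 < 256 := by
  rw [PySem.Int.mod_eq_emod_of_pos (by norm_num : (0:Int) < 256)]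
  constructor
  · exact Int.emod_nonneg tile (by norm_num)
  · exact Int.emod_lt_of_pos tile (by norm_num)

theorem pv_mod256_idem (tile : Int) :
    PySem.Int.mod (PySem.Int.mod tile 256) 256 = PySem.Int.mod tile 256 := by
  obtain ⟨h0, h1⟩ := pv_mod256_bounds tile
  rw [PySem.Int.mod_eq_emod_of_pos (by norm_num : (0:Int) < 256)]
  omega

theorem pv_key : ∀ n : Fin 256, get_solidness (n : Int) = get_solidness_alt (n : Int) := by decide

theorem get_solidness_spec : Claim_equal_get_solidness := by
  intro tile _
  unfold Spec_get_solidness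
  obtain ⟨h0, h1⟩ := pv_mod256_bounds tile
  have hA : get_solidness tile = get_solidness (PySem.Int.mod tile 256) := by
    simp only [get_solidness, pv_mod256_idem]
  have hB : get_solidness_alt tile = get_solidness_alt (PySem.Int.mod tile 256) := by
    simp only [get_solidness_alt, pv_mod256_idem]
  set t := PySem.Int.mod tile 256 with ht
  have hn : t = ((t.toNat : Nat) : Int) := by omega
  have hlt : t.toNat < 256 := by omega
  rw [hA, hB, hn]
  exact pv_key ⟨t.toNat, hlt⟩
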